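-- pv_equiv track=rewrite | github.com/DavidSemke/GroupConvoAnalysis | src/utils/rqa_data_pts.py | trim_pauses
-- ===== SOURCE A (Python) =====
-- def trim_pauses(data_pts):
--     trim_start = 0
--     for pt in data_pts:
--         if pt != 1: break
--         trim_start += 1
--
--     trim_end = 0
--     for pt in reversed(data_pts):
--         if pt != 1: break
--         trim_end += 1
--
--     data_pts = data_pts[trim_start:len(data_pts)-trim_end]
--
--     return data_pts
-- ===== SOURCE B (Python) =====
-- def trim_pauses(data_pts):
--     first = None
--     last = 0
--     for i, pt in enumerate(data_pts):
--         if pt != 1: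
--             if first is None:
--                 first = i
--             last = i
--     if first is None:
--         return data_pts[0:0]
--     return data_pts[first:last+1]
-- ===== Notes on version B (the rewrite author's own statement) =====
-- stated objective: alternative
-- what changed: B replaces A's two opposite-direction break-early scans plus slice arithmetic by a single forward enumerate pass that records the first and last non-1 indices, then slices [first:last+1] (empty slice when none found).
import Mathlib
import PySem

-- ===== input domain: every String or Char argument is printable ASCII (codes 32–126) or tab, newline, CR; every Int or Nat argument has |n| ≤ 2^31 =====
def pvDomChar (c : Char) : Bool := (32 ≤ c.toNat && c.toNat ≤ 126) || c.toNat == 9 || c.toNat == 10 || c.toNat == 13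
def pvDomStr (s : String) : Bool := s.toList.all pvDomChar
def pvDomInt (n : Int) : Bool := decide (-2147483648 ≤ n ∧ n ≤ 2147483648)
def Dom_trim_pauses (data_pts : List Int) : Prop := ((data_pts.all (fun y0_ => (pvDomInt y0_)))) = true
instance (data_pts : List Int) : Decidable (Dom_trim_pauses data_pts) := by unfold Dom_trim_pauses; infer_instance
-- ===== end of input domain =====

-- B replaces A's two opposite-direction break-early scans by one forward enumerate
-- pass tracking the first and last non-1 indices; same O(n) cost, different decomposition.

-- ===== PORT A =====
-- the 'for pt in xs: if pt != 1: break; trim += 1' loop (count of leading 1s)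
def pvCountLeadOnes : List Int → Nat
  | [] => 0
  | pt :: rest => if pt ≠ 1 then 0 else pvCountLeadOnes rest + 1

def trim_pauses (data_pts : List Int) : List Int :=
  let trim_start := pvCountLeadOnes data_pts
  let trim_end := pvCountLeadOnes data_pts.reverse
  PySem.List.slice data_pts (some (trim_start : Int)) (some ((data_pts.length : Int) - (trim_end : Int)))

-- ===== PORT B =====
def pvStep (st : Option Int × Int) (p : Int × Int) : Option Int × Int :=
  if p.2 ≠ 1 then ((if st.1.isNone then some p.1 else st.1), p.1) else st

def trim_pauses_alt (data_pts : List Int) : List Int :=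
  let st := (PySem.List.enumerate data_pts 0).foldl pvStep (none, 0)
  match st.1 with
  | none => PySem.List.slice data_pts (some 0) (some 0)
  | some f => PySem.List.slice data_pts (some f) (some (st.2 + 1))

-- ===== PRECONDITION & SPEC =====
def Spec_trim_pauses (data_pts : List Int) (out : List Int) : Prop := out = trim_pauses_alt data_pts
instance (data_pts : List Int) (out : List Int) : Decidable (Spec_trim_pauses data_pts out) := by unfold Spec_trim_pauses; infer_instance

-- ===== CLAIM (what is proved, stated in full; the proofs are below) =====
def Claim_equal_trim_pauses : Prop := ∀ (data_pts : List Int), Dom_trim_pauses data_pts → Spec_trim_pauses data_pts (trim_pauses data_pts)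

-- ===== LEMMAS AND PROOFS =====

theorem tsA_ones {l : List Int} (h : ∀ x ∈ l, x = 1) : pvCountLeadOnes l = l.length := by
  induction l with
  | nil => rfl
  | cons x xs ih =>
    have hx : x = 1 := h x (by simp)
    simp [pvCountLeadOnes, hx, ih (fun y hy => h y (by simp [hy]))]

theorem tsA_append_ones {m r : List Int} (h : ∀ x ∈ m, x = 1) :
    pvCountLeadOnes (m ++ r) = m.length + pvCountLeadOnes r := by
  induction m with
  | nil => simp
  | cons x xs ih =>
    have hx : x = 1 := h x (by simp)
    simp [pvCountLeadOnes, hx, ih (fun y hy => h y (by simp [hy]))]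
    omega

theorem tsA_append_ex {m : List Int} (r : List Int) (h : ∃ x ∈ m, x ≠ 1) :
    pvCountLeadOnes (m ++ r) = pvCountLeadOnes m := by
  induction m with
  | nil => simp at h
  | cons x xs ih =>
    by_cases hx : x = 1
    · subst hx
      have : ∃ y ∈ xs, y ≠ 1 := by
        rcases h with ⟨y, hy, hne⟩
        rcases hy with _ | hy
        · exact absurd rfl hne
        · exact ⟨y, by assumption, hne⟩
      simp [pvCountLeadOnes, ih this]
    · simp [pvCountLeadOnes, hx]

theorem fold_ones {l : List Int} (s : Int) (st : Option Int × Int)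
    (h : ∀ x ∈ l, x = 1) :
    (PySem.List.enumerate l s).foldl pvStep st = st := by
  induction l generalizing s st with
  | nil => simp [PySem.List.enumerate_nil]
  | cons x xs ih =>
    have hx : x = 1 := h x (by simp)
    rw [PySem.List.enumerate_cons]
    simp only [List.foldl_cons]
    rw [show pvStep st (s, x) = st by simp [pvStep, hx]]
    exact ih (s + 1) st (fun y hy => h y (by simp [hy]))

theorem fold_char {l : List Int} (s : Int) (st : Option Int × Int)
    (h : ∃ x ∈ l, x ≠ 1) :
    (PySem.List.enumerate l s).foldl pvStep st =
      ((if st.1.isNone then some (s + (pvCountLeadOnes l : Int)) else st.1),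
       s + (l.length : Int) - 1 - (pvCountLeadOnes l.reverse : Int)) := by
  induction l generalizing s st with
  | nil => simp at h
  | cons x xs ih =>
    rw [PySem.List.enumerate_cons]
    simp only [List.foldl_cons]
    by_cases hx : x = 1
    · subst hx
      have hxs : ∃ y ∈ xs, y ≠ 1 := by
        rcases h with ⟨y, hy, hne⟩
        rcases hy with _ | hy
        · exact absurd rfl hne
        · exact ⟨y, by assumption, hne⟩
      have hrev : ∃ y ∈ xs.reverse, y ≠ 1 := by
        rcases hxs with ⟨y, hy, hne⟩; exact ⟨y, by simp [hy], hne⟩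
      rw [show pvStep st (s, 1) = st by simp [pvStep]]
      rw [ih (s + 1) st hxs]
      simp [pvCountLeadOnes, tsA_append_ex [(1:Int)] hrev]
      constructor
      · split <;> simp
        ring
      · ring
    · rw [show pvStep st (s, x) = ((if st.1.isNone then some s else st.1), s) by
        simp [pvStep, hx]]
      by_cases hxs : ∀ y ∈ xs, y = 1
      · have hrev : ∀ y ∈ xs.reverse, y = 1 := fun y hy => hxs y (by simpa using hy)
        rw [fold_ones (s + 1) _ hxs]
        have h1 : pvCountLeadOnes (x :: xs) = 0 := by simp [pvCountLeadOnes, hx]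
        have h2 : pvCountLeadOnes ((x :: xs).reverse) = xs.length := by
          simp only [List.reverse_cons]
          rw [tsA_append_ones hrev]
          simp [pvCountLeadOnes, hx]
        rw [h1, h2]
        refine Prod.ext ?_ ?_
        · simp
        · simp only [List.length_cons]; push_cast; ring
      · have hex : ∃ y ∈ xs, y ≠ 1 := by
          push Not at hxs; rcases hxs with ⟨y, hy, hne⟩; exact ⟨y, hy, hne⟩
        have hrev : ∃ y ∈ xs.reverse, y ≠ 1 := by
          rcases hex with ⟨y, hy, hne⟩; exact ⟨y, by simp [hy], hne⟩
        rw [ih (s + 1) _ hex]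
        have h1 : pvCountLeadOnes (x :: xs) = 0 := by simp [pvCountLeadOnes, hx]
        have h2 : pvCountLeadOnes ((x :: xs).reverse) = pvCountLeadOnes xs.reverse := by
          simp only [List.reverse_cons]
          exact tsA_append_ex [x] hrev
        rw [h1, h2]
        refine Prod.ext ?_ ?_
        · by_cases hst : st.1.isNone = true <;> simp [hst]
        · simp only [List.length_cons]; push_cast; ring

-- ===== VERDICT (by name: the statement is the Claim_ definition above) =====
theorem trim_pauses_spec : Claim_equal_trim_pauses := by
  intro l _
  unfold Spec_trim_pauses trim_pauses trim_pauses_alt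
  by_cases hall : ∀ x ∈ l, x = 1
  · have hrev : ∀ x ∈ l.reverse, x = 1 := fun y hy => hall y (by simpa using hy)
    rw [fold_ones 0 _ hall]
    rw [tsA_ones hall, tsA_ones hrev]
    simp only [List.length_reverse]
    have : ((l.length : Int) - (l.length : Int)) = ((0 : Nat) : Int) := by push_cast; ring
    rw [this]
    rw [PySem.List.slice_natCast, show ((0:Int)) = ((0:Nat):Int) by rfl,
        PySem.List.slice_natCast]
    simp
  · have hex : ∃ x ∈ l, x ≠ 1 := by
      push Not at hall; rcases hall with ⟨y, hy, hne⟩; exact ⟨y, hy, hne⟩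
    rw [fold_char 0 _ hex]
    simp only [Option.isNone_none, if_true]
    have e1 : (0 : Int) + (pvCountLeadOnes l : Int) = (pvCountLeadOnes l : Int) := by ring
    have e2 : (0 : Int) + (l.length : Int) - 1 - (pvCountLeadOnes l.reverse : Int) + 1
        = (l.length : Int) - (pvCountLeadOnes l.reverse : Int) := by ring
    rw [e1, e2]
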